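-- pv_equiv track=rewrite | github.com/SmithMMTK/LearnPython | Lessons/Stock/maze/04 maze.py | canShortenSol1
-- ===== SOURCE A (Python) =====
-- def canShortenSol1(path):
--     """
--     Determines if any position in the given path has at least three adjacent positions that are also part of the path,
--     suggesting that the path may be shortened.
--
--     Parameters:
--         path (list of tuples): List of positions in the path, where each position is a tuple (row, col).
--
--     Returns:
--         bool: True if the path can potentially be shortened, otherwise False.
--     """
--     # Loop through each position in the path except the last one
--     for turn in range(len(path) - 1):
--         y, x = path[turn]
--
--         # Define positions of adjacent cells
--         adjacent_positions = [
--             (y - 1, x),  # Up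
--             (y + 1, x),  # Down
--             (y, x - 1),  # Left
--             (y, x + 1)   # Right
--         ]
--
--
--         # Count how many adjacent positions are also in the path
--         count = sum(1 for pos in adjacent_positions if pos in path)
--
--         # Check if three or more adjacent positions are part of the path
--         if count >= 3:
--             return True
--
--     return False
-- ===== SOURCE B (Python) =====
-- def canShortenSol1(path):
--     S = set(path)
--     deg = {}
--     for (y, x) in S:
--         for nb in ((y, x + 1), (y + 1, x)):
--             if nb in S:
--                 deg[(y, x)] = deg.get((y, x), 0) + 1
--                 deg[nb] = deg.get(nb, 0) + 1
--     for turn in range(len(path) - 1):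
--         if deg.get(path[turn], 0) >= 3:
--             return True
--     return False
-- ===== Notes on version B (the rewrite author's own statement) =====
-- stated objective: faster
-- what changed: A rescans the whole path list for each of the 4 neighbors of every index; B deduplicates the path into a set, builds a degree table in one pass by crediting each right/down adjacency to both endpoints, then scans the indices with O(1) lookups.
import Mathlib
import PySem

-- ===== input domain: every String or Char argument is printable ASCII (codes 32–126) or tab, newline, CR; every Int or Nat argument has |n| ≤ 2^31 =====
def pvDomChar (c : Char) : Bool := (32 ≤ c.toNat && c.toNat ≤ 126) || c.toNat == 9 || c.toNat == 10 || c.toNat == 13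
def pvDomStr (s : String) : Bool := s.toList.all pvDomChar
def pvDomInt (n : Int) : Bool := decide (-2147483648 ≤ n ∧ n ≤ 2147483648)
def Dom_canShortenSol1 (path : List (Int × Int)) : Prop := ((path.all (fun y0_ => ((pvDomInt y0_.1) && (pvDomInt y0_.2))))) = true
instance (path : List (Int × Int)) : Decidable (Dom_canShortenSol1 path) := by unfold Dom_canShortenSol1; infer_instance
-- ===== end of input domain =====

-- B replaces A's per-index rescan of the whole path (quadratic-style membership tests) by one
-- degree table built from the deduplicated position set, counting each adjacency once for both
-- endpoints; objective: faster (constant/asymptotic mechanism), same return value everywhere.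

-- ===== PORT A =====
-- the for-loop with early 'return True'; 'none' branch of path[turn] is unreachable (turn ∈ range(len-1))
def pvALoop (path : List (Int × Int)) : List Int → Bool
  | [] => false
  | turn :: rest =>
    match PySem.List.pyGet? path turn with
    | none => false
    | some (y, x) =>
      let adjacent := [(y - 1, x), (y + 1, x), (y, x - 1), (y, x + 1)]
      let count : Int := (adjacent.map (fun pos => if pos ∈ path then (1 : Int) else 0)).sum
      if count ≥ 3 then true else pvALoop path rest

def canShortenSol1 (path : List (Int × Int)) : Bool :=
  pvALoop path (PySem.List.pyRange 0 ((path.length : Int) - 1) 1)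

-- ===== PORT B =====
-- body of B's set loop: for each cell, credit the right and down neighbour adjacencies to both endpoints
def pvBStep (S : PySem.Set (Int × Int)) (d : PySem.Dict (Int × Int) Int) (c : Int × Int) :
    PySem.Dict (Int × Int) Int :=
  [(c.1, c.2 + 1), (c.1 + 1, c.2)].foldl
    (fun d nb =>
      if nb ∈ S then
        let d1 := d.insert c (d.getD c 0 + 1)
        d1.insert nb (d1.getD nb 0 + 1)
      else d) d

def pvBLoop (path : List (Int × Int)) (deg : PySem.Dict (Int × Int) Int) : List Int → Bool
  | [] => false
  | turn :: rest =>
    match PySem.List.pyGet? path turn with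
    | none => false
    | some c => if deg.getD c 0 ≥ 3 then true else pvBLoop path deg rest

def canShortenSol1_alt (path : List (Int × Int)) : Bool :=
  let S := PySem.Set.ofList path
  let deg := S.foldl (pvBStep S) PySem.Dict.empty
  pvBLoop path deg (PySem.List.pyRange 0 ((path.length : Int) - 1) 1)

-- ===== PRECONDITION & SPEC =====
def Spec_canShortenSol1 (path : List (Int × Int)) (out : Bool) : Prop := out = canShortenSol1_alt path
instance (path : List (Int × Int)) (out : Bool) : Decidable (Spec_canShortenSol1 path out) := by unfold Spec_canShortenSol1; infer_instance

-- ===== CLAIM (what is proved, stated in full; the proofs are below) =====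
def Claim_equal_canShortenSol1 : Prop := ∀ (path : List (Int × Int)), Dom_canShortenSol1 path → Spec_canShortenSol1 path (canShortenSol1 path)

-- ===== LEMMAS AND PROOFS =====

-- contribution of processing cell c to the degree of cell t
def pvContrib (S : PySem.Set (Int × Int)) (c t : Int × Int) : Int :=
  (if (c.1, c.2 + 1) ∈ S then
      (if t = c then 1 else 0) + (if t = (c.1, c.2 + 1) then 1 else 0) else 0)
  + (if (c.1 + 1, c.2) ∈ S then
      (if t = c then 1 else 0) + (if t = (c.1 + 1, c.2) then 1 else 0) else 0)

theorem pvInc_getD (d : PySem.Dict (Int × Int) Int) (k t : Int × Int) :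
    (d.insert k (d.getD k 0 + 1)).getD t 0 = d.getD t 0 + (if t = k then 1 else 0) := by
  rw [PySem.Dict.getD_insert]
  split_ifs with h
  · subst h; ring
  · ring

theorem pvBStep_getD (S : PySem.Set (Int × Int)) (d : PySem.Dict (Int × Int) Int)
    (c t : Int × Int) : (pvBStep S d c).getD t 0 = d.getD t 0 + pvContrib S c t := by
  unfold pvBStep pvContrib
  simp only [List.foldl]
  by_cases h1 : (c.1, c.2 + 1) ∈ S <;> by_cases h2 : (c.1 + 1, c.2) ∈ S <;>
    simp only [h1, h2, if_true, if_false] <;>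
    (repeat rw [pvInc_getD]) <;>
    (first
      | (split_ifs <;>
          first
            | ring
            | (exfalso; simp only [Prod.ext_iff] at *; omega))
      | ring)

theorem pvFold_getD (S : PySem.Set (Int × Int)) (l : List (Int × Int))
    (d : PySem.Dict (Int × Int) Int) (t : Int × Int) :
    (l.foldl (pvBStep S) d).getD t 0 = d.getD t 0 + (l.map (fun c => pvContrib S c t)).sum := by
  induction l generalizing d with
  | nil => simp
  | cons c rest ih => simp [List.foldl, ih, pvBStep_getD]; ring

theorem pvSum_pointmass (l : List (Int × Int)) (hl : l.Nodup) (a : Int × Int) (k : Int) :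
    (l.map (fun c => if c = a then k else 0)).sum = if a ∈ l then k else 0 := by
  induction l with
  | nil => simp
  | cons c rest ih =>
    simp only [List.nodup_cons] at hl
    by_cases hc : c = a
    · subst hc
      simp [ih hl.2, hl.1]
    · simp [hc, ih hl.2, Ne.symm hc]

theorem pvContrib_split (S : PySem.Set (Int × Int)) (c t : Int × Int) :
    pvContrib S c t =
      (if c = t then (if (t.1, t.2 + 1) ∈ S then (1:Int) else 0)
                 + (if (t.1 + 1, t.2) ∈ S then (1:Int) else 0) else 0)
      + (if c = (t.1, t.2 - 1) then (if t ∈ S then (1:Int) else 0) else 0)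
      + (if c = (t.1 - 1, t.2) then (if t ∈ S then (1:Int) else 0) else 0) := by
  unfold pvContrib
  by_cases h1 : c = t
  · subst h1
    have n1 : ¬ c = (c.1, c.2 - 1) := by intro he; rw [Prod.ext_iff] at he; omega
    have n2 : ¬ c = (c.1 - 1, c.2) := by intro he; rw [Prod.ext_iff] at he; omega
    have n3 : ¬ c = (c.1, c.2 + 1) := by intro he; rw [Prod.ext_iff] at he; omega
    have n4 : ¬ c = (c.1 + 1, c.2) := by intro he; rw [Prod.ext_iff] at he; omega
    simp only [n1, n2, n3, n4, if_true, if_false, if_pos rfl]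
    split_ifs <;> ring
  · by_cases h2 : c = (t.1, t.2 - 1)
    · subst h2
      have e : ((t.1 : Int), t.2 - 1 + 1) = t := by rw [Prod.ext_iff]; constructor <;> omega
      have n1 : ¬ t = (t.1, t.2 - 1) := by intro he; rw [Prod.ext_iff] at he; omega
      have n2 : ¬ t = (t.1 + 1, t.2 - 1) := by intro he; rw [Prod.ext_iff] at he; omega
      have n3 : ¬ ((t.1 : Int), t.2 - 1) = (t.1 - 1, t.2) := by
        intro he; rw [Prod.ext_iff] at he; omega
      have n1' : ¬ ((t.1 : Int), t.2 - 1) = t := fun he => n1 he.symm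
      simp only [e, n1, n2, n3, n1', if_true, if_false, if_pos rfl]
      split_ifs <;> ring
    · by_cases h3 : c = (t.1 - 1, t.2)
      · subst h3
        have e : ((t.1 : Int) - 1 + 1, t.2) = t := by rw [Prod.ext_iff]; constructor <;> omega
        have n1 : ¬ t = (t.1 - 1, t.2) := by intro he; rw [Prod.ext_iff] at he; omega
        have n2 : ¬ t = (t.1 - 1, t.2 + 1) := by intro he; rw [Prod.ext_iff] at he; omega
        have n3 : ¬ ((t.1 : Int) - 1, t.2) = (t.1, t.2 - 1) := by
          intro he; rw [Prod.ext_iff] at he; omega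
        have n1' : ¬ ((t.1 : Int) - 1, t.2) = t := fun he => n1 he.symm
        simp only [e, n1, n2, n3, n1', if_true, if_false, if_pos rfl]
        split_ifs <;> ring
      · have n1 : ¬ t = c := Ne.symm h1
        have n2 : ¬ t = (c.1, c.2 + 1) := by
          intro he; apply h2
          obtain ⟨a, b⟩ := c; obtain ⟨u, v⟩ := t
          rw [Prod.ext_iff] at he ⊢; simp at he ⊢; omega
        have n3 : ¬ t = (c.1 + 1, c.2) := by
          intro he; apply h3
          obtain ⟨a, b⟩ := c; obtain ⟨u, v⟩ := t
          rw [Prod.ext_iff] at he ⊢; simp at he ⊢; omega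
        simp only [n1, n2, n3, h1, h2, h3, if_false]
        split_ifs <;> ring

theorem pvContrib_sum (S : PySem.Set (Int × Int)) (l : List (Int × Int)) (hl : l.Nodup)
    (t : Int × Int) :
    (l.map (fun c => pvContrib S c t)).sum =
      (if t ∈ l then (if (t.1, t.2 + 1) ∈ S then (1:Int) else 0)
                 + (if (t.1 + 1, t.2) ∈ S then (1:Int) else 0) else 0)
      + (if (t.1, t.2 - 1) ∈ l then (if t ∈ S then (1:Int) else 0) else 0)
      + (if (t.1 - 1, t.2) ∈ l then (if t ∈ S then (1:Int) else 0) else 0) := by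
  calc (l.map (fun c => pvContrib S c t)).sum
      = (l.map (fun c =>
          (if c = t then (if (t.1, t.2 + 1) ∈ S then (1:Int) else 0)
                     + (if (t.1 + 1, t.2) ∈ S then (1:Int) else 0) else 0)
          + ((if c = (t.1, t.2 - 1) then (if t ∈ S then (1:Int) else 0) else 0)
          + (if c = (t.1 - 1, t.2) then (if t ∈ S then (1:Int) else 0) else 0)))).sum := by
        apply congrArg
        apply List.map_congr_left
        intro c _
        rw [pvContrib_split S c t]; ring
    _ = _ := by
        rw [PySem.List.sum_map_add_int, PySem.List.sum_map_add_int]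
        rw [pvSum_pointmass l hl, pvSum_pointmass l hl, pvSum_pointmass l hl]
        ring

-- the degree table value at a cell of the set is its number of present neighbours
theorem pvDeg_eq (path : List (Int × Int)) (t : Int × Int) (ht : t ∈ path) :
    ((PySem.Set.ofList path).foldl (pvBStep (PySem.Set.ofList path)) PySem.Dict.empty).getD t 0 =
      (if (t.1 - 1, t.2) ∈ path then (1:Int) else 0) + (if (t.1 + 1, t.2) ∈ path then (1:Int) else 0)
      + (if (t.1, t.2 - 1) ∈ path then (1:Int) else 0) + (if (t.1, t.2 + 1) ∈ path then (1:Int) else 0) := by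
  rw [pvFold_getD, pvContrib_sum _ _ (PySem.Set.nodup_ofList path)]
  simp [PySem.Set.mem_ofList, ht]
  ring

theorem pvLoops_eq (path : List (Int × Int)) (idxs : List Int) :
    pvALoop path idxs =
      pvBLoop path ((PySem.Set.ofList path).foldl (pvBStep (PySem.Set.ofList path)) PySem.Dict.empty) idxs := by
  induction idxs with
  | nil => rfl
  | cons turn rest ih =>
    simp only [pvALoop, pvBLoop]
    cases hg : PySem.List.pyGet? path turn with
    | none => rfl
    | some c =>
      obtain ⟨y, x⟩ := c
      dsimp only
      have hmem : (y, x) ∈ path := PySem.List.mem_of_pyGet?_eq_some path hg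
      rw [pvDeg_eq path (y, x) hmem]
      simp only [List.map, List.sum_cons, List.sum_nil]
      rw [ih]
      ring_nf

-- ===== VERDICT (by name: the statement is the Claim_ definition above) =====
theorem canShortenSol1_spec : Claim_equal_canShortenSol1 := by
  intro path _
  unfold Spec_canShortenSol1 canShortenSol1 canShortenSol1_alt
  exact pvLoops_eq path _
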